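-- pv_equiv track=rewrite | github.com/Amrokahla/Bot-Framework | core/bot/handlers/plugin_handler.py | get_minimum_role
-- ===== SOURCE A (Python) =====
-- def get_minimum_role(allowed_roles):
--     """
--     Determine the minimum role required based on allowed_roles list.
--
--     Args:
--         allowed_roles: List of allowed roles (e.g., ["admin", "superadmin"] or ["all"])
--
--     Returns:
--         str or None: Minimum role required (None means no restriction)
--     """
--     if not allowed_roles:
--         return "admin"  # Default to admin if not specified
--
--     # If "all" is in allowed_roles, no role restriction
--     if "all" in allowed_roles:
--         return None
--
--     # Role hierarchy: superadmin > admin > user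
--     role_hierarchy = {"user": 1, "admin": 2, "superadmin": 3}
--
--     # Find the lowest role in the hierarchy
--     min_level = float('inf')
--     min_role = "admin"
--
--     for role in allowed_roles:
--         role_lower = role.lower()
--         if role_lower in role_hierarchy:
--             level = role_hierarchy[role_lower]
--             if level < min_level:
--                 min_level = level
--                 min_role = role_lower
--
--     return min_role
-- ===== SOURCE B (Python) =====
-- def get_minimum_role(allowed_roles):
--     if not allowed_roles:
--         return "admin"
--     if "all" in allowed_roles:
--         return None
--     roles = {r.lower() for r in allowed_roles}
--     if "user" in roles:
--         return "user"
--     if "admin" in roles: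
--         return "admin"
--     if "superadmin" in roles:
--         return "superadmin"
--     return "admin"
-- ===== Notes on version B (the rewrite author's own statement) =====
-- stated objective: simpler
-- what changed: Replaced the running min-level/min-role loop over a hierarchy dict by a lowercased set plus three ordered membership tests in hierarchy order (the first level present is the minimum), keeping the empty-list and case-sensitive 'all' guards.
import Mathlib
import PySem

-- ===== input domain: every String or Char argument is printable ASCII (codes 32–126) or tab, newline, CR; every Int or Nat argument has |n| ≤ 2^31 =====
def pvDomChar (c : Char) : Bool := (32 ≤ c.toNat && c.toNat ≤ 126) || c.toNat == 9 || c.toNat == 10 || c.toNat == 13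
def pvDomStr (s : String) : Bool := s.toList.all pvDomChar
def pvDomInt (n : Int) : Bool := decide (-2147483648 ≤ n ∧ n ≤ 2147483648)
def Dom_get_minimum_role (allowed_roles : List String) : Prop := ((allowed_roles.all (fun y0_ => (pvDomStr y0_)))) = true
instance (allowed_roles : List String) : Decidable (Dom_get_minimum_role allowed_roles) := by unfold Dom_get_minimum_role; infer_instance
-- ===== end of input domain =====

-- B replaces A's running min-level/min-role loop by a lowercased set and three ordered
-- membership tests in hierarchy order (simpler; same O(n) cost).


-- ===== PORT A =====
-- role_hierarchy = {"user": 1, "admin": 2, "superadmin": 3}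
def pvHier : PySem.Dict String Int :=
  PySem.Dict.ofList [("user", 1), ("admin", 2), ("superadmin", 3)]

-- one iteration of A's for-loop over (min_level, min_role);
-- min_level = float('inf') is ported as 4, strictly above every hierarchy level 1..3,
-- so every comparison `level < min_level` has the same outcome as with inf
def pvLoopA (st : Int × String) (role : String) : Int × String :=
  let role_lower := PySem.Str.lower role
  match PySem.Dict.get? pvHier role_lower with
  | some level => if level < st.1 then (level, role_lower) else st
  | none => st

def get_minimum_role (allowed_roles : List String) : Option String :=
  if allowed_roles = [] then some "admin"
  else if allowed_roles.contains "all" then none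
  else
    let st := allowed_roles.foldl pvLoopA (4, "admin")
    some st.2

-- ===== PORT B =====
def get_minimum_role_alt (allowed_roles : List String) : Option String :=
  if allowed_roles = [] then some "admin"
  else if allowed_roles.contains "all" then none
  else
    let roles : PySem.Set String := PySem.Set.ofList (allowed_roles.map PySem.Str.lower)
    if PySem.Set.contains roles "user" then some "user"
    else if PySem.Set.contains roles "admin" then some "admin"
    else if PySem.Set.contains roles "superadmin" then some "superadmin"
    else some "admin"

-- ===== PRECONDITION & SPEC =====
def Spec_get_minimum_role (allowed_roles : List String) (out : Option String) : Prop := out = get_minimum_role_alt allowed_roles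
instance (allowed_roles : List String) (out : Option String) : Decidable (Spec_get_minimum_role allowed_roles out) := by unfold Spec_get_minimum_role; infer_instance

-- ===== CLAIM (what is proved, stated in full; the proofs are below) =====
def Claim_equal_get_minimum_role : Prop := ∀ (allowed_roles : List String), Dom_get_minimum_role allowed_roles → Spec_get_minimum_role allowed_roles (get_minimum_role allowed_roles)

-- ===== LEMMAS AND PROOFS =====

-- characterisation of A's loop from an arbitrary state
theorem pvLoopA_spec (l : List String) (lv : Int) (r : String) :
    l.foldl pvLoopA (lv, r) =
      if (l.any fun x => PySem.Str.lower x == "user") = true ∧ 1 < lv then (1, "user")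
      else if (l.any fun x => PySem.Str.lower x == "admin") = true ∧ 2 < lv then (2, "admin")
      else if (l.any fun x => PySem.Str.lower x == "superadmin") = true ∧ 3 < lv then (3, "superadmin")
      else (lv, r) := by
  induction l generalizing lv r with
  | nil => simp
  | cons h t ih =>
    by_cases h1 : PySem.Str.lower h = "user"
    · simp only [List.foldl_cons, pvLoopA, h1]
      by_cases hlv : 1 < lv
      · rw [show PySem.Dict.get? pvHier "user" = some 1 from rfl]
        simp only [hlv, ih]
        simp [h1]
        try (split_ifs <;> simp_all <;> try omega)
      · rw [show PySem.Dict.get? pvHier "user" = some 1 from rfl]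
        simp only [if_neg hlv, ih]
        simp [h1]
        try (split_ifs <;> simp_all <;> try omega)
    · by_cases h2 : PySem.Str.lower h = "admin"
      · simp only [List.foldl_cons, pvLoopA, h2]
        rw [show PySem.Dict.get? pvHier "admin" = some 2 from rfl]
        by_cases hlv : 2 < lv
        · simp only [if_pos hlv, ih]
          simp [h2, hlv]
          try (split_ifs <;> simp_all <;> try omega)
        · simp only [if_neg hlv, ih]
          simp [h2]
          try (split_ifs <;> simp_all <;> try omega)
      · by_cases h3 : PySem.Str.lower h = "superadmin"
        · simp only [List.foldl_cons, pvLoopA, h3]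
          rw [show PySem.Dict.get? pvHier "superadmin" = some 3 from rfl]
          by_cases hlv : 3 < lv
          · simp only [if_pos hlv, ih]
            simp [h3, hlv]
            try (split_ifs <;> simp_all <;> try omega)
          · simp only [if_neg hlv, ih]
            simp [h3]
            try (split_ifs <;> simp_all <;> try omega)
        · have hn : PySem.Dict.get? pvHier (PySem.Str.lower h) = none := by
            simp only [PySem.Dict.get?]
            rw [show pvHier.items = [("user", (1 : Int)), ("admin", 2), ("superadmin", 3)] from rfl]
            simp [Ne.symm h1, Ne.symm h2, Ne.symm h3]
          simp only [List.foldl_cons, pvLoopA, hn, ih]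
          simp [h1, h2, h3]

-- ===== VERDICT (by name: the statement is the Claim_ definition above) =====
theorem get_minimum_role_spec : Claim_equal_get_minimum_role := by
  intro l _
  unfold Spec_get_minimum_role get_minimum_role get_minimum_role_alt
  by_cases he : l = []
  · simp [he]
  · simp only [if_neg he]
    by_cases ha : l.contains "all"
    · have hmem : "all" ∈ l := by simpa using ha
      simp [hmem]
    · simp only [ha, Bool.false_eq_true, if_false, pvLoopA_spec]
      have hnorm : ∀ s : String, PySem.Set.contains (PySem.Set.ofList (l.map PySem.Str.lower)) s
          = l.any fun x => PySem.Str.lower x == s := by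
        intro s
        by_cases hm : s ∈ l.map PySem.Str.lower
        · have hc : PySem.Set.contains (PySem.Set.ofList (l.map PySem.Str.lower)) s = true := by
            rw [PySem.Set.contains_iff, PySem.Set.mem_ofList]; exact hm
          rw [hc]; symm; rw [List.any_eq_true]
          obtain ⟨x, hx, hxe⟩ := List.mem_map.mp hm
          exact ⟨x, hx, by simp [hxe]⟩
        · have hc : PySem.Set.contains (PySem.Set.ofList (l.map PySem.Str.lower)) s = false := by
            rw [Bool.eq_false_iff]; intro hcon
            exact hm ((PySem.Set.mem_ofList _ _).mp ((PySem.Set.contains_iff _ _).mp hcon))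
          rw [hc]; symm; rw [Bool.eq_false_iff]; intro hcon
          obtain ⟨x, hx, hxe⟩ := List.any_eq_true.mp hcon
          exact hm (List.mem_map.mpr ⟨x, hx, by simpa using hxe⟩)
      simp only [hnorm]
      norm_num
      split_ifs <;> simp_all
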